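-- pv_equiv track=rewrite | github.com/edt-yxz-zzd/python3_src | nn_ns/math_nn/math_func/Schonhage_Strassen_algorithm.py | __u2k
-- ===== SOURCE A (Python) =====
-- def __u2k(LxLy, u):
--     assert u > 0
--     # n = max(LxLy/u+2, k+2*u)
--     n = (LxLy+u-1)//u+2
--     k = n.bit_length() - 1
--     if 2**k < n:
--         k += 1
--         assert 2**k >= n
--         n = 2**k
--     assert n == 2**k
--     while n < k+2*u:
--         k += 1
--         n *= 2
--     return k
-- ===== SOURCE B (Python) =====
-- def __u2k(LxLy, u):
--     # simpler: single monotone search for the smallest k with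
--     # 2**k >= n0 and 2**k >= k + 2*u (no bit_length estimate, no two-phase loop)
--     assert u > 0
--     n0 = (LxLy + u - 1) // u + 2
--     k = 0
--     while (1 << k) < n0 or (1 << k) < k + 2 * u:
--         k += 1
--     return k
-- ===== Notes on version B (the rewrite author's own statement) =====
-- stated objective: simpler
-- what changed: Replaces the bit_length closed estimate plus correction plus doubling loop by one linear monotone search from k=0 for the smallest k with 2^k >= n0 and 2^k >= k+2u, which is the same value because both conditions are monotone in k.
import Mathlib
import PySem

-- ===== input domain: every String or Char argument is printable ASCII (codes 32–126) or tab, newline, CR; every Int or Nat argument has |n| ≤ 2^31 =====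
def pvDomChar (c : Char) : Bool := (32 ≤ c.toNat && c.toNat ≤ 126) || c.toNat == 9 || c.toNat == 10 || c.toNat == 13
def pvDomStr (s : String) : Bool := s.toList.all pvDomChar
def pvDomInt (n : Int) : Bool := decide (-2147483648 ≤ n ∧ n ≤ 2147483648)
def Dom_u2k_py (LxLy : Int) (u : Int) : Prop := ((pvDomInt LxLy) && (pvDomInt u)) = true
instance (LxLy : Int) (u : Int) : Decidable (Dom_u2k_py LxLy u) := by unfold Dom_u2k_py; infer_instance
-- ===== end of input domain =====

-- B replaces A's bit_length estimate + correction + doubling loop by one monotone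
-- search from k = 0 for the smallest k with 2^k ≥ n0 and 2^k ≥ k + 2u (objective: simpler).

-- ===== PORT A =====
-- A's `while n < k+2*u: k += 1; n *= 2`; the fuel only makes the recursion total in Lean:
-- on every input admitted by Dom ∧ Pre_ the guard fails before 100 iterations.
def u2kLoopA (u : Int) : Nat → Int → Int → Int
  | 0, _, k => k
  | f+1, n, k => if n < k + 2*u then u2kLoopA u f (n*2) (k+1) else k

def u2k_py (LxLy : Int) (u : Int) : Int :=
  -- `assert u > 0` and the later asserts raise exactly outside Pre_u2k_py
  let n := PySem.Int.floordiv (LxLy + u - 1) u + 2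
  let k := (PySem.Int.bitLength n : Int) - 1
  let k1 := if (2:Int) ^ k.toNat < n then k + 1 else k
  let n1 := if (2:Int) ^ k.toNat < n then (2:Int) ^ k1.toNat else n
  u2kLoopA u 100 n1 k1

-- ===== PORT B =====
-- B's `while (1 << k) < n0 or (1 << k) < k + 2*u: k += 1`; fuel 100 for totality only.
def u2kLoopB (u : Int) (n0 : Int) : Nat → Int → Int
  | 0, k => k
  | f+1, k =>
      if (2:Int) ^ k.toNat < n0 ∨ (2:Int) ^ k.toNat < k + 2*u then u2kLoopB u n0 f (k+1) else k

def u2k_py_alt (LxLy : Int) (u : Int) : Int :=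
  -- `assert u > 0` raises exactly where A's does (outside Pre_u2k_py)
  let n0 := PySem.Int.floordiv (LxLy + u - 1) u + 2
  u2kLoopB u n0 100 0

-- ===== PRECONDITION & SPEC =====
-- Excludes exactly the AssertionErrors of A: `assert u > 0`, and `assert n == 2**k`,
-- which fires iff n0 = (LxLy+u-1)//u+2 ≤ 0, i.e. iff LxLy < 1 - 2*u (for u > 0).
def Pre_u2k_py (LxLy : Int) (u : Int) : Prop := 0 < u ∧ 1 - 2*u ≤ LxLy
instance (LxLy : Int) (u : Int) : Decidable (Pre_u2k_py LxLy u) := by unfold Pre_u2k_py; infer_instance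
def pvWitness_u2k_py : Int × Int := (5, 1)

def Spec_u2k_py (LxLy : Int) (u : Int) (out : Int) : Prop := out = u2k_py_alt LxLy u
instance (LxLy : Int) (u : Int) (out : Int) : Decidable (Spec_u2k_py LxLy u out) := by unfold Spec_u2k_py; infer_instance

-- ===== CLAIM (what is proved, stated in full; the proofs are below) =====
def Claim_equal_u2k_py : Prop := ∀ (LxLy : Int) (u : Int), Dom_u2k_py LxLy u → Pre_u2k_py LxLy u → Spec_u2k_py LxLy u (u2k_py LxLy u)
-- ===== LEMMAS AND PROOFS =====

-- the search condition both loops stop at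
def u2kCond (u n0 : Int) (m : Nat) : Prop := n0 ≤ (2:Int) ^ m ∧ (m : Int) + 2*u ≤ (2:Int) ^ m

lemma u2kLoopB_run (u n0 : Int) (mstop : Nat)
    (hstop : u2kCond u n0 mstop) (hmin : ∀ j, j < mstop → ¬ u2kCond u n0 j) :
    ∀ (f : Nat) (m : Nat), m ≤ mstop → mstop ≤ m + f → u2kLoopB u n0 f (m : Int) = mstop := by
  intro f
  induction f with
  | zero =>
    intro m h1 h2
    have hme : m = mstop := by omega
    subst hme
    simp [u2kLoopB]
  | succ f ih =>
    intro m h1 h2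
    by_cases hm : m = mstop
    · subst hm
      obtain ⟨hc1, hc2⟩ := hstop
      simp only [u2kLoopB, Int.toNat_natCast]
      rw [if_neg (by push_neg; exact ⟨hc1, hc2⟩)]
    · have hlt : m < mstop := by omega
      have hnc := hmin m hlt
      have hguard : (2:Int) ^ m < n0 ∨ (2:Int) ^ m < (m : Int) + 2*u := by
        by_contra h; push_neg at h; exact hnc ⟨h.1, h.2⟩
      simp only [u2kLoopB, Int.toNat_natCast]
      rw [if_pos hguard]
      have : ((m : Int) + 1) = ((m + 1 : Nat) : Int) := by push_cast; ring
      rw [this]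
      exact ih (m+1) (by omega) (by omega)

lemma u2kLoop_bridge (u n0 : Int) :
    ∀ (f : Nat) (m : Nat) (n : Int), n = (2:Int) ^ m → n0 ≤ n →
      u2kLoopA u f n (m : Int) = u2kLoopB u n0 f (m : Int) := by
  intro f
  induction f with
  | zero => intro m n _ _; simp [u2kLoopA, u2kLoopB]
  | succ f ih =>
    intro m n hn hle
    simp only [u2kLoopA, u2kLoopB, Int.toNat_natCast]
    by_cases hg : n < (m : Int) + 2*u
    · rw [if_pos hg, if_pos (by right; rw [← hn]; exact hg)]
      have hcast : ((m : Int) + 1) = ((m + 1 : Nat) : Int) := by push_cast; ring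
      rw [hcast]
      have hn' : n * 2 = (2:Int) ^ (m+1) := by rw [hn, pow_succ]
      exact ih (m+1) (n*2) hn' (by nlinarith [pow_pos (by norm_num : (0:Int) < 2) m])
    · have hng : ¬((2:Int) ^ m < n0 ∨ (2:Int) ^ m < (m : Int) + 2*u) := by
        push_neg
        push_neg at hg
        rw [← hn]
        exact ⟨hle, hg⟩
      rw [if_neg hg, if_neg hng]

-- ===== VERDICT (by name: the statement is the Claim_ definition above) =====
theorem u2k_py_spec : Claim_equal_u2k_py := by
  intro LxLy u hdom hpre
  obtain ⟨hu, hL⟩ := hpre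
  unfold Spec_u2k_py
  set n0 : Int := PySem.Int.floordiv (LxLy + u - 1) u + 2 with hn0def
  -- bounds on n0
  have hdomL : LxLy ≤ 2147483648 ∧ u ≤ 2147483648 := by
    unfold Dom_u2k_py pvDomInt at hdom
    simp only [Bool.and_eq_true, decide_eq_true_eq] at hdom
    exact ⟨hdom.1.2, hdom.2.2⟩
  have hn0lo : 1 ≤ n0 := by
    have := (PySem.Int.le_floordiv_iff_mul_le (a := LxLy + u - 1) (b := u) (q := -1) hu).mpr
      (by nlinarith)
    omega
  have hn0hi : n0 ≤ 2147483651 := by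
    have := (PySem.Int.floordiv_lt_iff_lt_mul (a := LxLy + u - 1) (b := u)
      (q := 2147483650) hu).mpr (by nlinarith [hdomL.1, hdomL.2])
    omega
  -- least stopping index
  have hQ40 : u2kCond u n0 40 := by
    constructor
    · calc n0 ≤ 2147483651 := hn0hi
        _ ≤ (2:Int) ^ 40 := by norm_num
    · have := hdomL.2; push_cast; nlinarith
  haveI : DecidablePred (u2kCond u n0) := fun m => by unfold u2kCond; infer_instance
  have hex : ∃ m, u2kCond u n0 m := ⟨40, hQ40⟩
  set mstop := Nat.find hex with hmsdef
  have hstop : u2kCond u n0 mstop := Nat.find_spec hex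
  have hmin : ∀ j, j < mstop → ¬ u2kCond u n0 j := fun j hj => Nat.find_min hex hj
  have hms40 : mstop ≤ 40 := Nat.find_le hQ40
  -- bit_length facts
  have hne : n0 ≠ 0 := by omega
  set b : Nat := PySem.Int.bitLength n0 with hbdef
  have habs : (n0.natAbs : Int) = n0 := Int.natAbs_of_nonneg (by omega)
  have hub : n0 < (2:Int) ^ b := by
    have := PySem.Int.lt_two_pow_bitLength n0
    calc n0 = (n0.natAbs : Int) := habs.symm
      _ < ((2 ^ b : Nat) : Int) := by exact_mod_cast this
      _ = (2:Int) ^ b := by push_cast; ring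
  have hlb : (2:Int) ^ (b-1) ≤ n0 := by
    have := PySem.Int.two_pow_bitLength_le n0 hne
    calc (2:Int) ^ (b-1) = ((2 ^ (b-1) : Nat) : Int) := by push_cast; ring
      _ ≤ (n0.natAbs : Int) := by exact_mod_cast this
      _ = n0 := habs
  have hb1 : 1 ≤ b := by
    by_contra h
    have : b = 0 := by omega
    rw [this] at hub; norm_num at hub; omega
  -- the index A's head computes, as a Nat
  set m1 : Nat := if (2:Int) ^ (b-1) < n0 then b else b - 1 with hm1def
  -- below m1, the first condition fails
  have hm1lt : ∀ j, j < m1 → (2:Int) ^ j < n0 := by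
    intro j hj
    by_cases hc : (2:Int) ^ (b-1) < n0
    · rw [hm1def, if_pos hc] at hj
      calc (2:Int) ^ j ≤ (2:Int) ^ (b-1) := pow_le_pow_right₀ (by norm_num) (by omega)
        _ < n0 := hc
    · rw [hm1def, if_neg hc] at hj
      calc (2:Int) ^ j < (2:Int) ^ (b-1) := pow_lt_pow_right₀ (by norm_num) (by omega)
        _ ≤ n0 := hlb
  have hm1le : m1 ≤ mstop := by
    by_contra h
    exact absurd hstop.1 (by push_neg; exact hm1lt mstop (by omega))
  -- identify A's head with (2^m1, m1)
  have hkto : ((PySem.Int.bitLength n0 : Int) - 1).toNat = b - 1 := by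
    rw [← hbdef]; omega
  have hA : u2k_py LxLy u = u2kLoopA u 100 ((2:Int) ^ m1) (m1 : Int) := by
    simp only [u2k_py, ← hn0def]
    rw [hkto, ← hbdef]
    by_cases hc : (2:Int) ^ (b-1) < n0
    · rw [if_pos hc, if_pos hc, hm1def, if_pos hc]
      have h1 : (PySem.Int.bitLength n0 : Int) - 1 + 1 = (b : Int) := by rw [← hbdef]; ring
      rw [h1, Int.toNat_natCast]
    · rw [if_neg hc, if_neg hc, hm1def, if_neg hc]
      push_neg at hc
      have hn0eq : n0 = (2:Int) ^ (b-1) := le_antisymm hc hlb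
      have h2 : (PySem.Int.bitLength n0 : Int) - 1 = ((b - 1 : Nat) : Int) := by
        rw [← hbdef]; omega
      rw [hn0eq, h2]
  have hn0le1 : n0 ≤ (2:Int) ^ m1 := by
    by_cases hc : (2:Int) ^ (b-1) < n0
    · rw [hm1def, if_pos hc]; omega
    · rw [hm1def, if_neg hc]; push_neg at hc; exact hc
  calc u2k_py LxLy u = u2kLoopA u 100 ((2:Int) ^ m1) (m1 : Int) := hA
    _ = u2kLoopB u n0 100 (m1 : Int) := u2kLoop_bridge u n0 100 m1 _ rfl hn0le1
    _ = (mstop : Int) := u2kLoopB_run u n0 mstop hstop hmin 100 m1 hm1le (by omega)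
    _ = u2kLoopB u n0 100 ((0 : Nat) : Int) :=
        (u2kLoopB_run u n0 mstop hstop hmin 100 0 (by omega) (by omega)).symm
    _ = u2kLoopB u n0 100 0 := by norm_num
    _ = u2k_py_alt LxLy u := by rw [hn0def]; rfl
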